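-- pv_equiv track=rewrite | github.com/torourke14/__TannersMenagerie__ | StringAlignmentOptimization/StringAlignmentOptimization.py | commonSubstrings
-- ===== SOURCE A (Python) =====
-- def commonSubstrings(x,L,a):
--
--     # params -- string x, integer 1<=L<= len(x), sequence of edits a
--
--     # return -- substrings (len >= L) in x that aligns (via no-ops) to substring in y
--
--     substrings = []
--
--     substr = ""
--
--     ind = 0
--
--     for i in range(0,len(a)): # loop through list of edits
--
--         # If a no-op -- append x[ind] to substr until we use an op
--
--         if(a[i]== 'no-op'):
--
--             substr = substr + x[ind]
--
--             ind = ind + 1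
--
--         else:
--
--             # If not a no-op -- append substr, reset substr, increment 'ind'
--
--             if (len(substr) >= L):
--
--                 substrings.append(substr)
--
--             substr = ""
--
--             if(a[i] == 'insert'):
--
--                 ind = ind + 1
--
--             if(a[i] == 'swap'):
--
--                 ind = ind + 2
--
--     if ( len(substr) >= L ): # if list of edits a ends with a no-op
--
--         substrings.append(substr)
--
--     return substrings
-- ===== SOURCE B (Python) =====
-- def commonSubstrings(x, L, a):
--     # Run-based re-implementation: group the edit sequence into maximal runs of
--     # 'no-op' / non-'no-op' edits; each no-op run of length n contributes the
--     # slice x[ind:ind+n] (emitted when n >= L), non-no-op runs only advance ind.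
--     substrings = []
--     ind = 0
--     i = 0
--     m = len(a)
--     while i < m:
--         j = i
--         if a[i] == 'no-op':
--             while j < m and a[j] == 'no-op':
--                 j += 1
--             n = j - i
--             if n >= L:
--                 substrings.append(x[ind:ind + n])
--             ind += n
--         else:
--             while j < m and a[j] != 'no-op':
--                 ind += 1 if a[j] == 'insert' else 2 if a[j] == 'swap' else 0
--                 j += 1
--         i = j
--     return substrings
-- ===== Notes on version B (the rewrite author's own statement) =====
-- stated objective: alternative
-- what changed: Replaces A's per-edit accumulate-and-flush loop (building the substring one character at a time) with grouping the edit list into maximal runs: a no-op run of length n emits the slice x[ind:ind+n] at once, a non-no-op run only advances the index. Pre_ excludes L <= 0 (outside the documented domain 1<=L<=len(x); there A emits an empty string at every flush, which the run decomposition has no reason to reproduce) and inputs where a 'no-op' edit is reached with the x-index out of range (A raises IndexError there).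
-- outside the precondition, e.g. on commonSubstrings('ab', 0, ['insert']): A returns ['', ''], B returns []
import Mathlib
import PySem

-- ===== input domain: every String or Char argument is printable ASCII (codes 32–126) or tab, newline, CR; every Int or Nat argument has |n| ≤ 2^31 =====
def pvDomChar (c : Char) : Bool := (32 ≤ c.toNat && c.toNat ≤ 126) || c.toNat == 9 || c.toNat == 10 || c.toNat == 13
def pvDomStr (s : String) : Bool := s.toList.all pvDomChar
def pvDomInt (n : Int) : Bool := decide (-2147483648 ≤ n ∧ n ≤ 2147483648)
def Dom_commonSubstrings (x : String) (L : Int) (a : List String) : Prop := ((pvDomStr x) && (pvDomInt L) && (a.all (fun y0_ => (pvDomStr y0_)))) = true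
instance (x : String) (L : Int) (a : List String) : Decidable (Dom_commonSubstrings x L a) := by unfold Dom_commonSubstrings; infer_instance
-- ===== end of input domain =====

-- B replaces A's per-edit accumulate-and-flush loop by grouping the edit list into maximal
-- runs and slicing x once per no-op run (objective: alternative decomposition, same cost).

-- ===== PORT A =====
-- A's loop state: (substrings, substr, ind).  x[ind] is PySem.List.pyGet?
-- (none = Python's IndexError, excluded by Pre_; the .getD ' ' default is only
-- reached outside Pre_).
def pvAStep (xs : List Char) (L : Int) (st : List String × List Char × Nat) (e : String) :
    List String × List Char × Nat :=
  if e = "no-op" then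
    (st.1, st.2.1 ++ [(PySem.List.pyGet? xs (st.2.2 : Int)).getD ' '], st.2.2 + 1)
  else
    ((if L ≤ (st.2.1.length : Int) then st.1 ++ [String.ofList st.2.1] else st.1), [],
      st.2.2 + (if e = "insert" then 1 else 0) + (if e = "swap" then 2 else 0))

-- the final flush after the loop
def pvAFinish (L : Int) (st : List String × List Char × Nat) : List String :=
  if L ≤ (st.2.1.length : Int) then st.1 ++ [String.ofList st.2.1] else st.1

def commonSubstrings (x : String) (L : Int) (a : List String) : List String :=
  pvAFinish L (a.foldl (pvAStep x.toList L) ([], [], 0))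

-- ===== PORT B =====
-- weight of a non-'no-op' edit: 1 if 'insert' else 2 if 'swap' else 0
def pvNWt (e : String) : Nat := if e = "insert" then 1 else if e = "swap" then 2 else 0

-- B's outer while loop; one step per maximal run (takeWhile/dropWhile = the inner
-- while j loops).  The Nat fuel only makes the recursion structural: it is called
-- with fuel = a.length, which the loop never exhausts.
def pvBLoop (xs : List Char) (L : Int) : Nat → List String → Nat → List String
  | _, [], _ => []
  | 0, _ :: _, _ => []
  | fuel + 1, e :: rest, ind =>
    if e = "no-op" then
      let n := (rest.takeWhile (fun e' => e' == "no-op")).length + 1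
      (if L ≤ (n : Int) then
          [String.ofList (PySem.List.slice xs (some (ind : Int)) (some ((ind : Int) + (n : Int))))]
        else []) ++
        pvBLoop xs L fuel (rest.dropWhile (fun e' => e' == "no-op")) (ind + n)
    else
      pvBLoop xs L fuel (rest.dropWhile (fun e' => !(e' == "no-op")))
        (ind + pvNWt e + ((rest.takeWhile (fun e' => !(e' == "no-op"))).map pvNWt).sum)

def commonSubstrings_alt (x : String) (L : Int) (a : List String) : List String :=
  pvBLoop x.toList L a.length a 0

-- ===== PRECONDITION & SPEC =====
-- full weight of an edit (how far it advances the x-index in A)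
def pvWe (e : String) : Nat :=
  if e = "no-op" then 1 else if e = "insert" then 1 else if e = "swap" then 2 else 0
def pvW (l : List String) : Nat := (l.map pvWe).sum

-- Pre_ excludes L ≤ 0 (outside the documented domain 1 <= L <= len(x); there A appends an
-- empty string at every flush, which the run decomposition does not reproduce) and inputs
-- where some 'no-op' edit is reached with the running x-index at or past len(x)
-- (A raises IndexError there).
def Pre_commonSubstrings (x : String) (L : Int) (a : List String) : Prop :=
  1 ≤ L ∧ ∀ i ∈ List.range a.length, a[i]? = some "no-op" → pvW (a.take i) < x.toList.length
instance (x : String) (L : Int) (a : List String) : Decidable (Pre_commonSubstrings x L a) := by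
  unfold Pre_commonSubstrings; infer_instance

def pvWitness_commonSubstrings : String × Int × List String :=
  ("abc", 1, ["no-op", "insert", "no-op"])

def Spec_commonSubstrings (x : String) (L : Int) (a : List String) (out : List String) : Prop :=
  out = commonSubstrings_alt x L a
instance (x : String) (L : Int) (a : List String) (out : List String) :
    Decidable (Spec_commonSubstrings x L a out) := by unfold Spec_commonSubstrings; infer_instance

-- ===== CLAIM (what is proved, stated in full; the proofs are below) =====
def Claim_equal_commonSubstrings : Prop := ∀ (x : String) (L : Int) (a : List String),
  Dom_commonSubstrings x L a → Pre_commonSubstrings x L a →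
  Spec_commonSubstrings x L a (commonSubstrings x L a)

-- ===== LEMMAS AND PROOFS =====

-- common element-wise reference shape: state (a, s, m) means the current pending
-- substring is x[s:s+m] (so ind = s+m)
def pvE (xs : List Char) (L : Int) : List String → Nat → Nat → List String
  | [], s, m => if L ≤ (m : Int) then [String.ofList ((xs.drop s).take m)] else []
  | e :: rest, s, m =>
    if e = "no-op" then pvE xs L rest s (m + 1)
    else
      (if L ≤ (m : Int) then [String.ofList ((xs.drop s).take m)] else []) ++
        pvE xs L rest (s + m + pvNWt e) 0

lemma pvNWt_eq (e : String) :
    (if e = "insert" then 1 else 0) + (if e = "swap" then 2 else 0) = pvNWt e := by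
  by_cases h1 : e = "insert" <;> by_cases h2 : e = "swap" <;> simp_all [pvNWt]

lemma pvWe_nonnoop (e : String) (h : ¬ e = "no-op") : pvWe e = pvNWt e := by
  simp [pvWe, pvNWt, h]

lemma pv_take_len (xs : List Char) (s m : Nat) (h : s + m ≤ xs.length ∨ m = 0) :
    ((xs.drop s).take m).length = m := by
  rcases h with h | h <;> simp [List.length_take, List.length_drop] <;> omega

lemma pvA_eq_pvE (xs : List Char) (L : Int) (hL : 1 ≤ L) :
    ∀ (a : List String) (s m : Nat) (subs : List String),
      (∀ i, i < a.length → a[i]? = some "no-op" → s + m + pvW (a.take i) < xs.length) →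
      (s + m ≤ xs.length ∨ m = 0) →
      pvAFinish L (a.foldl (pvAStep xs L) (subs, (xs.drop s).take m, s + m)) =
        subs ++ pvE xs L a s m := by
  intro a
  induction a with
  | nil =>
    intro s m subs _ hinv
    have hlen := pv_take_len xs s m hinv
    simp only [List.foldl_nil, pvAFinish, pvE, hlen]
    split <;> simp
  | cons e rest ih =>
    intro s m subs H hinv
    by_cases he : e = "no-op"
    · have h0 : s + m < xs.length := by
        have := H 0 (by simp) (by simp [he]); simpa [pvW] using this
      have hget : (PySem.List.pyGet? xs ((s + m : Nat) : Int)).getD ' ' = xs[s + m] := by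
        rw [PySem.List.pyGet?_natCast]
        simp [List.getElem?_eq_getElem h0]
      have hchar : (xs.drop s).take m ++ [xs[s + m]] = (xs.drop s).take (m + 1) := by
        rw [List.take_succ]
        congr 1
        rw [List.getElem?_drop]
        simp [List.getElem?_eq_getElem h0]
      simp only [List.foldl_cons, pvAStep, he, if_true]
      rw [hget, hchar]
      have heq : s + m + 1 = s + (m + 1) := by omega
      rw [heq]
      rw [ih s (m + 1) subs ?_ (Or.inl (by omega))]
      · simp [pvE]
      · intro i hi hnoop
        have := H (i + 1) (by simpa using hi) (by simpa using hnoop)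
        simp only [List.take_succ_cons, pvW, List.map_cons, List.sum_cons] at this
        simp only [pvW]
        have hwe : pvWe e = 1 := by simp [pvWe, he]
        omega
    · have hlen := pv_take_len xs s m hinv
      simp only [List.foldl_cons, pvAStep, he, if_false]
      have hx : (s + m + if e = "insert" then 1 else 0) + (if e = "swap" then 2 else 0) =
          (s + m + pvNWt e) + 0 := by
        have h := pvNWt_eq e; omega
      have hnil : ([] : List Char) = (xs.drop (s + m + pvNWt e)).take 0 := by simp
      rw [hx, hnil]
      rw [ih (s + m + pvNWt e) 0 _ ?_ (Or.inr rfl)]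
      · simp only [pvE, he, hlen]
        split <;> simp
      · intro i hi hnoop
        have := H (i + 1) (by simpa using hi) (by simpa using hnoop)
        simp only [List.take_succ_cons, pvW, List.map_cons, List.sum_cons] at this
        simp only [pvW]
        rw [pvWe_nonnoop e he] at this
        omega

lemma pvE_noop_run (xs : List Char) (L : Int) :
    ∀ (run : List String), (∀ e ∈ run, e = "no-op") →
      ∀ tail s m, pvE xs L (run ++ tail) s m = pvE xs L tail s (m + run.length) := by
  intro run
  induction run with
  | nil => intro _ tail s m; simp
  | cons r rs ih =>
    intro h tail s m
    have hr : r = "no-op" := h r (by simp)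
    subst hr
    simp only [List.cons_append, pvE, reduceIte]
    rw [ih (fun e he => h e (by simp [he])) tail s (m + 1)]
    have hlen : m + ("no-op" :: rs).length = m + 1 + rs.length := by
      simp only [List.length_cons]; omega
    rw [hlen]

lemma pvE_nonnoop_run (xs : List Char) (L : Int) (hL : 1 ≤ L) :
    ∀ (run : List String), (∀ e ∈ run, ¬ e = "no-op") →
      ∀ tail s, pvE xs L (run ++ tail) s 0 = pvE xs L tail (s + (run.map pvNWt).sum) 0 := by
  intro run
  induction run with
  | nil => intro _ tail s; simp
  | cons r rs ih =>
    intro h tail s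
    have hr : ¬ r = "no-op" := h r (by simp)
    have h0 : ¬ (L ≤ (0 : Int)) := by omega
    simp only [List.cons_append, pvE, hr, reduceIte, Nat.cast_zero, h0, List.nil_append]
    rw [ih (fun e he => h e (by simp [he])) tail (s + 0 + pvNWt r)]
    have hsum : s + ((r :: rs).map pvNWt).sum = s + 0 + pvNWt r + (rs.map pvNWt).sum := by
      simp only [List.map_cons, List.sum_cons]; omega
    rw [hsum]

lemma pv_dropWhile_head (p : String → Bool) :
    ∀ (l : List String) (t : String) (ts : List String),
      l.dropWhile p = t :: ts → p t = false := by
  intro l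
  induction l with
  | nil => intro t ts h; simp [List.dropWhile] at h
  | cons a as ih =>
    intro t ts h
    by_cases hp : p a
    · rw [List.dropWhile_cons_of_pos hp] at h; exact ih t ts h
    · rw [List.dropWhile_cons_of_neg hp] at h
      cases h
      exact Bool.not_eq_true _ |>.mp hp

lemma pvB_eq_pvE (xs : List Char) (L : Int) (hL : 1 ≤ L) :
    ∀ (N : Nat) (a : List String), a.length ≤ N → ∀ ind,
      pvBLoop xs L N a ind = pvE xs L a ind 0 := by
  intro N
  induction N with
  | zero =>
    intro a ha ind
    have : a = [] := by cases a <;> simp_all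
    subst this
    simp [pvBLoop, pvE]
    omega
  | succ N ih =>
    intro a ha ind
    have h0 : ¬ (L ≤ (0 : Int)) := by omega
    cases a with
    | nil => simp [pvBLoop, pvE]; omega
    | cons e rest =>
      have ha' : rest.length ≤ N := by simp at ha; omega
      by_cases he : e = "no-op"
      · subst he
        have hrunmem : ∀ e' ∈ rest.takeWhile (fun e' => e' == "no-op"), e' = "no-op" := by
          intro e' he'; simpa using List.mem_takeWhile_imp he'
        have htl : (rest.dropWhile (fun e' => e' == "no-op")).length ≤ N :=
          le_trans (List.length_dropWhile_le _ _) ha'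
        simp only [pvBLoop, reduceIte]
        rw [PySem.List.slice_natCast_add, ih _ htl]
        simp only [pvE, reduceIte, Nat.zero_add]
        have hR : pvE xs L rest ind 1 =
            pvE xs L (rest.dropWhile (fun e' => e' == "no-op")) ind
              ((rest.takeWhile (fun e' => e' == "no-op")).length + 1) := by
          conv_lhs => rw [← List.takeWhile_append_dropWhile
            (p := fun e' => e' == "no-op") (l := rest)]
          rw [pvE_noop_run xs L _ hrunmem]
          congr 1
          omega
        rw [hR]
        cases htail2 : rest.dropWhile (fun e' => e' == "no-op") with
        | nil => simp [pvE, h0]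
        | cons t ts =>
          have ht : ¬ t = "no-op" := by
            simpa using pv_dropWhile_head _ rest t ts htail2
          simp only [pvE, ht, reduceIte, Nat.cast_zero, h0, List.nil_append]
          congr 2
      · have hrunmem : ∀ e' ∈ rest.takeWhile (fun e' => !(e' == "no-op")), ¬ e' = "no-op" := by
          intro e' he'
          have := List.mem_takeWhile_imp he'
          simpa using this
        have htl : (rest.dropWhile (fun e' => !(e' == "no-op"))).length ≤ N :=
          le_trans (List.length_dropWhile_le _ _) ha'
        simp only [pvBLoop, he, reduceIte]
        rw [ih _ htl]
        simp only [pvE, he, reduceIte, Nat.cast_zero, h0, List.nil_append]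
        have hR : pvE xs L rest (ind + 0 + pvNWt e) 0 =
            pvE xs L (rest.dropWhile (fun e' => !(e' == "no-op")))
              (ind + 0 + pvNWt e + ((rest.takeWhile (fun e' => !(e' == "no-op"))).map pvNWt).sum) 0 := by
          conv_lhs => rw [← List.takeWhile_append_dropWhile
            (p := fun e' => !(e' == "no-op")) (l := rest)]
          rw [pvE_nonnoop_run xs L hL _ hrunmem]
        rw [hR]
        congr 2

-- ===== VERDICT (by name: the statement is the Claim_ definition above) =====
theorem commonSubstrings_spec : Claim_equal_commonSubstrings := by
  intro x L a _ hpre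
  obtain ⟨hL, hH⟩ := hpre
  unfold Spec_commonSubstrings commonSubstrings commonSubstrings_alt
  have h1 := pvA_eq_pvE x.toList L hL a 0 0 []
    (by intro i hi hnoop
        have := hH i (by simpa using hi) hnoop
        simpa using this)
    (Or.inr rfl)
  simp only [List.drop_zero, List.take_zero, Nat.add_zero] at h1
  rw [h1, pvB_eq_pvE x.toList L hL a.length a le_rfl 0]
  simp
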